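-- pv_equiv track=rewrite | github.com/jms/potential-bassoon | srl/services/parse.py | sxgtonum
-- ===== SOURCE A (Python) =====
-- def sxgtonum(s):
--     n = 0
--     j = len(s)
--     for i in range(0, j):
--         c = ord(s[i])
--         if 48 <= c <= 57:
--             c -= 48
--         elif 65 <= c <= 72:
--             c -= 55
--         elif c == 73 or c == 108:  # typo capital I, lowercase l to 1
--             c = 1
--         elif 74 <= c <= 78:
--             c -= 56
--         elif c == 79:  # error correct typo capital O to 0
--             c = 0
--         elif 80 <= c <= 90:
--             c -= 57
--         elif c == 95:
--             c = 34
--         elif 97 <= c <= 107: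
--             c -= 62
--         elif 109 <= c <= 122:
--             c -= 63
--         else:
--             c = 0  # treat all other noise as 0
--         n = 60 * n + c
--
--     return n
-- ===== SOURCE B (Python) =====
-- # Table-driven positional evaluation: char->value table built once, then the
-- # string is scanned right-to-left adding value * place-weight (weight p = 60**place),
-- # instead of A's if/elif branch chain with a left-to-right Horner accumulator.
--
-- _SXG_TBL = [0] * 128
-- for _i, _ch in enumerate("0123456789"):
--     _SXG_TBL[ord(_ch)] = _i
-- for _i, _ch in enumerate("ABCDEFGH"):
--     _SXG_TBL[ord(_ch)] = 10 + _i
-- for _i, _ch in enumerate("JKLMN"):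
--     _SXG_TBL[ord(_ch)] = 18 + _i
-- for _i, _ch in enumerate("PQRSTUVWXYZ"):
--     _SXG_TBL[ord(_ch)] = 23 + _i
-- for _i, _ch in enumerate("abcdefghijk"):
--     _SXG_TBL[ord(_ch)] = 35 + _i
-- for _i, _ch in enumerate("mnopqrstuvwxyz"):
--     _SXG_TBL[ord(_ch)] = 46 + _i
-- _SXG_TBL[ord("I")] = 1
-- _SXG_TBL[ord("l")] = 1
-- _SXG_TBL[ord("O")] = 0
-- _SXG_TBL[ord("_")] = 34
--
--
-- def sxgtonum(s):
--     total = 0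
--     p = 1
--     for ch in reversed(s):
--         c = ord(ch)
--         total += (_SXG_TBL[c] if c < 128 else 0) * p
--         p *= 60
--     return total
-- ===== Notes on version B (the rewrite author's own statement) =====
-- stated objective: alternative
-- what changed: Replaces A's per-character if/elif branch chain and left-to-right Horner accumulator (n = 60*n + c) with a precomputed 128-entry char-value table and a right-to-left scan that adds value * running place-weight (60^place).
import Mathlib
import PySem

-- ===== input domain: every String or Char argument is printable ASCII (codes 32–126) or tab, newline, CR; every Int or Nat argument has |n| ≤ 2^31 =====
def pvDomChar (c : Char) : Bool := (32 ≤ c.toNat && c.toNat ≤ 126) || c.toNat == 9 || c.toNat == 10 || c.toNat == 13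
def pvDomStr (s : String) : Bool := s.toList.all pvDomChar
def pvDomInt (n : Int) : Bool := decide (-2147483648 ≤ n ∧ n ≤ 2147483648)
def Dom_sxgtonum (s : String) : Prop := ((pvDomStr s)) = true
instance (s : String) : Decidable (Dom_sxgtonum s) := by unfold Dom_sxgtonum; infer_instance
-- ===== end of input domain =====

-- B replaces A's branch-chain Horner loop by a precomputed 128-entry value table and a
-- right-to-left scan adding value * running place-weight (60^place); objective: alternative.

-- ===== PORT A =====
-- A's per-character branch chain on the ordinal c = ord(s[i])
def sxgOrdVal (c : Int) : Int :=
  if 48 ≤ c ∧ c ≤ 57 then c - 48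
  else if 65 ≤ c ∧ c ≤ 72 then c - 55
  else if c = 73 ∨ c = 108 then 1
  else if 74 ≤ c ∧ c ≤ 78 then c - 56
  else if c = 79 then 0
  else if 80 ≤ c ∧ c ≤ 90 then c - 57
  else if c = 95 then 34
  else if 97 ≤ c ∧ c ≤ 107 then c - 62
  else if 109 ≤ c ∧ c ≤ 122 then c - 63
  else 0

def sxgtonum (s : String) : Int :=
  s.toList.foldl (fun n ch => 60 * n + sxgOrdVal (ch.toNat : Int)) 0

-- ===== PORT B =====
-- the fixed table _SXG_TBL of Source B (128 entries)
def sxgTbl : List Int :=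
  [0, 0, 0, 0, 0, 0, 0, 0, 0, 0, 0, 0, 0, 0, 0, 0, 0, 0, 0, 0, 0, 0, 0, 0,
   0, 0, 0, 0, 0, 0, 0, 0, 0, 0, 0, 0, 0, 0, 0, 0, 0, 0, 0, 0, 0, 0, 0, 0,
   0, 1, 2, 3, 4, 5, 6, 7, 8, 9, 0, 0, 0, 0, 0, 0, 0, 10, 11, 12, 13, 14,
   15, 16, 17, 1, 18, 19, 20, 21, 22, 0, 23, 24, 25, 26, 27, 28, 29, 30, 31,
   32, 33, 0, 0, 0, 0, 34, 0, 35, 36, 37, 38, 39, 40, 41, 42, 43, 44, 45, 1,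
   46, 47, 48, 49, 50, 51, 52, 53, 54, 55, 56, 57, 58, 59, 0, 0, 0, 0, 0]

def sxgVal (ch : Char) : Int :=
  if ch.toNat < 128 then sxgTbl.getD ch.toNat 0 else 0

def sxgtonum_alt (s : String) : Int :=
  (s.toList.reverse.foldl
    (fun (st : Int × Int) ch => (st.1 + sxgVal ch * st.2, st.2 * 60)) (0, 1)).1

-- ===== PRECONDITION & SPEC =====
def Spec_sxgtonum (s : String) (out : Int) : Prop := out = sxgtonum_alt s
instance (s : String) (out : Int) : Decidable (Spec_sxgtonum s out) := by unfold Spec_sxgtonum; infer_instance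

-- ===== CLAIM (what is proved, stated in full; the proofs are below) =====
def Claim_equal_sxgtonum : Prop := ∀ (s : String), Dom_sxgtonum s → Spec_sxgtonum s (sxgtonum s)

-- ===== LEMMAS AND PROOFS =====

-- the branch chain and the table agree on every code below 128
theorem sxg_val_small : ∀ n : Nat, n < 128 → sxgOrdVal (n : Int) = sxgTbl.getD n 0 := by
  decide

-- on every character the two per-char value functions agree
theorem sxg_val_eq (ch : Char) : sxgOrdVal (ch.toNat : Int) = sxgVal ch := by
  by_cases h : ch.toNat < 128
  · rw [sxgVal, if_pos h, sxg_val_small ch.toNat h]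
  · have h' : (128 : Int) ≤ (ch.toNat : Int) := by exact_mod_cast Nat.le_of_not_lt h
    rw [sxgVal, if_neg h, sxgOrdVal]
    split_ifs <;> omega

-- the reversed running-weight fold: first component is Horner's tail, second is 60^len
theorem sxg_rev (l : List Char) :
    (∀ a : Int, l.foldl (fun n ch => 60 * n + sxgOrdVal (ch.toNat : Int)) a
        = a * 60 ^ l.length
          + (l.reverse.foldl
              (fun (st : Int × Int) ch => (st.1 + sxgVal ch * st.2, st.2 * 60)) (0, 1)).1)
    ∧ (l.reverse.foldl
        (fun (st : Int × Int) ch => (st.1 + sxgVal ch * st.2, st.2 * 60)) (0, 1)).2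
        = 60 ^ l.length := by
  induction l with
  | nil => simp
  | cons c l ih =>
    obtain ⟨ih1, ih2⟩ := ih
    refine ⟨fun a => ?_, ?_⟩
    · simp only [List.foldl_cons, List.reverse_cons, List.foldl_append, List.foldl_nil,
        List.length_cons]
      rw [ih1 (60 * a + sxgOrdVal (c.toNat : Int)), sxg_val_eq c, ih2]
      ring
    · simp only [List.reverse_cons, List.foldl_append, List.foldl_cons, List.foldl_nil,
        List.length_cons]
      rw [ih2]; ring

-- ===== VERDICT (by name: the statement is the Claim_ definition above) =====
theorem sxgtonum_spec : Claim_equal_sxgtonum := by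
  intro s _
  show sxgtonum s = sxgtonum_alt s
  rw [sxgtonum, sxgtonum_alt, (sxg_rev s.toList).1 0]
  simp
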